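-- pv_equiv track=rewrite | github.com/madrury/advent-of-code-2023 | day11/solution.py | find_galaxys
-- ===== SOURCE A (Python) =====
-- from typing import List, Self, Dict, Tuple, Set
--
-- Galaxy = Tuple[int, int]
--
-- def find_galaxys(
--     data: List[str],
--     empty_rows: Set[int],
--     empty_cols: Set[int],
--     expansion_factor: int
-- ) -> List[Galaxy]:
--     galaxys: List[Galaxy] = []
--     for i, row in enumerate(data):
--         for j, ch in enumerate(row):
--             if ch == '#':
--                 x = i + expansion_factor * sum(p in empty_rows for p in range(i))
--                 y = j + expansion_factor * sum(p in empty_cols for p in range(j))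
--                 galaxys.append((x, y))
--     return galaxys
-- ===== SOURCE B (Python) =====
-- def find_galaxys(data, empty_rows, empty_cols, expansion_factor):
--     R = len(data)
--     C = 0
--     for row in data:
--         C = max(C, len(row))
--     ers = set(empty_rows)
--     ecs = set(empty_cols)
--     row_off = [0]
--     for i in range(R):
--         row_off.append(row_off[i] + (i in ers))
--     col_off = [0]
--     for j in range(C):
--         col_off.append(col_off[j] + (j in ecs))
--     galaxys = []
--     for i, row in enumerate(data):
--         for j, ch in enumerate(row):
--             if ch == '#':
--                 galaxys.append((i + expansion_factor * row_off[i],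
--                                 j + expansion_factor * col_off[j]))
--     return galaxys
-- ===== Notes on version B (the rewrite author's own statement) =====
-- stated objective: alternative
-- what changed: B precomputes prefix-count tables of empty rows/cols once and looks each galaxy's offset up in O(1), instead of A's per-cell re-scan of range(i)/range(j); it trades A's per-galaxy scans for an upfront table build.
import Mathlib
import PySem

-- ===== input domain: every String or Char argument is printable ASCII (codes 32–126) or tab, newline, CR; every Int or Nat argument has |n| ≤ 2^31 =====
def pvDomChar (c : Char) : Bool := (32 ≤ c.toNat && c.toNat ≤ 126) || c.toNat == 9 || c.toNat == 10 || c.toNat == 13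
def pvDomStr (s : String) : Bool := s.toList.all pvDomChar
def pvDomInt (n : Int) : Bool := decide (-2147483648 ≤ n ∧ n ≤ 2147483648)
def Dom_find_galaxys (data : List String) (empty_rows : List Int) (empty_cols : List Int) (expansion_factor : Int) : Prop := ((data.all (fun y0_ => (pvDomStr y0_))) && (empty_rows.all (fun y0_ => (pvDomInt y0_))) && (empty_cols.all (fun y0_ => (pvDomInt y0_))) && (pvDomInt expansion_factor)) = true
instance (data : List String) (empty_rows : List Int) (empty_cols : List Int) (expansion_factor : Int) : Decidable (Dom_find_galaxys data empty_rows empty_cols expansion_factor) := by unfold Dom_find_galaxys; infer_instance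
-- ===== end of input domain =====

-- B replaces A's per-galaxy rescans of range(i)/range(j) by prefix-count tables built once, one table lookup per galaxy (objective: alternative).

-- ===== PORT A =====
-- sum(p in s for p in range(i))
def pvSumMem (s : List Int) (i : Int) : Int :=
  ((PySem.List.pyRange 0 i 1).map (fun p => if p ∈ s then (1 : Int) else 0)).sum

def find_galaxys (data : List String) (empty_rows : List Int) (empty_cols : List Int) (expansion_factor : Int) : List (Int × Int) :=
  (PySem.List.enumerate data 0).foldl (fun galaxys ir =>
    (PySem.List.enumerate ir.2.toList 0).foldl (fun g jc =>
      if jc.2 = '#' then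
        g ++ [(ir.1 + expansion_factor * pvSumMem empty_rows ir.1,
               jc.1 + expansion_factor * pvSumMem empty_cols jc.1)]
      else g) galaxys) []

-- ===== PORT B =====
-- the prefix table: off = [0]; for i in range(n): off.append(off[i] + (i in s))
def pvBuildOff (s : List Int) (n : Nat) : Array Int :=
  (List.range n).foldl (fun off i => off.push (off.getD i 0 + (if (i : Int) ∈ s then 1 else 0))) #[0]

def find_galaxys_alt (data : List String) (empty_rows : List Int) (empty_cols : List Int) (expansion_factor : Int) : List (Int × Int) :=
  let R := data.length
  let C := data.foldl (fun c row => max c row.toList.length) 0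
  let rowOff := pvBuildOff empty_rows R
  let colOff := pvBuildOff empty_cols C
  (PySem.List.enumerate data 0).foldl (fun galaxys ir =>
    (PySem.List.enumerate ir.2.toList 0).foldl (fun g jc =>
      if jc.2 = '#' then
        -- enumerate indices are nonnegative, so .toNat is exact here
        g ++ [(ir.1 + expansion_factor * rowOff.getD ir.1.toNat 0,
               jc.1 + expansion_factor * colOff.getD jc.1.toNat 0)]
      else g) galaxys) []

-- ===== PRECONDITION & SPEC =====
def Spec_find_galaxys (data : List String) (empty_rows : List Int) (empty_cols : List Int) (expansion_factor : Int) (out : List (Int × Int)) : Prop := out = find_galaxys_alt data empty_rows empty_cols expansion_factor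
instance (data : List String) (empty_rows : List Int) (empty_cols : List Int) (expansion_factor : Int) (out : List (Int × Int)) : Decidable (Spec_find_galaxys data empty_rows empty_cols expansion_factor out) := by unfold Spec_find_galaxys; infer_instance

-- ===== CLAIM (what is proved, stated in full; the proofs are below) =====
def Claim_equal_find_galaxys : Prop := ∀ (data : List String) (empty_rows : List Int) (empty_cols : List Int) (expansion_factor : Int), Dom_find_galaxys data empty_rows empty_cols expansion_factor → Spec_find_galaxys data empty_rows empty_cols expansion_factor (find_galaxys data empty_rows empty_cols expansion_factor)

-- ===== LEMMAS AND PROOFS =====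

theorem pv_array_getD (a : Array Int) (i : Nat) : a.getD i 0 = a.toList.getD i 0 := by
  rw [Array.getD, List.getD_eq_getElem?_getD]
  split
  · rename_i h
    simp [List.getElem?_eq_getElem (by simpa using h)]
  · rename_i h
    rw [List.getElem?_eq_none (by simpa using Nat.le_of_not_lt h)]
    rfl

-- generic congruence over an enumerate-foldl: the two step functions agree on every
-- (index, element) pair actually visited
theorem pv_foldl_enumerate_congr {α β : Type} (xs : List β) (s : Int) (acc : α)
    (g₁ g₂ : α → Int × β → α)
    (h : ∀ (a : α) (i : Int) (x : β), s ≤ i → i < s + xs.length → x ∈ xs →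
      g₁ a (i, x) = g₂ a (i, x)) :
    (PySem.List.enumerate xs s).foldl g₁ acc = (PySem.List.enumerate xs s).foldl g₂ acc := by
  induction xs generalizing s acc with
  | nil => simp [PySem.List.enumerate_nil]
  | cons x xs ih =>
    simp only [PySem.List.enumerate_cons, List.foldl_cons]
    rw [h acc s x le_rfl (by simp only [List.length_cons]; push_cast; omega) List.mem_cons_self]
    apply ih
    intro a i y h1 h2 hy
    refine h a i y (by omega) ?_ (List.mem_cons_of_mem _ hy)
    simp only [List.length_cons] at h2 ⊢
    push_cast at h2 ⊢
    omega

theorem pvSumMem_succ (s : List Int) (n : Nat) :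
    pvSumMem s ((n : Int) + 1) = pvSumMem s n + (if (n : Int) ∈ s then 1 else 0) := by
  unfold pvSumMem
  rw [PySem.List.pyRange_one_succ_right (by positivity)]
  simp

theorem pvBuildOff_toList (s : List Int) (n : Nat) :
    (pvBuildOff s n).toList = (List.range (n + 1)).map (fun i : Nat => pvSumMem s (i : Int)) := by
  induction n with
  | zero => simp [pvBuildOff, pvSumMem, PySem.List.pyRange_one_eq_nil]
  | succ n ih =>
    unfold pvBuildOff at ih ⊢
    rw [List.range_succ, List.foldl_append]
    simp only [List.foldl_cons, List.foldl_nil]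
    have hget : ((List.range n).foldl (fun off i => off.push (off.getD i 0 + (if (i : Int) ∈ s then 1 else 0))) #[0]).getD n 0 = pvSumMem s n := by
      rw [pv_array_getD, ih, List.getD_eq_getElem?_getD]
      simp
    rw [Array.toList_push, hget, ih, List.range_succ (n := n + 1), List.map_append]
    simp [pvSumMem_succ]

theorem pvBuildOff_getD (s : List Int) (n k : Nat) (hk : k ≤ n) :
    (pvBuildOff s n).getD k 0 = pvSumMem s k := by
  rw [pv_array_getD, pvBuildOff_toList, List.getD_eq_getElem?_getD]
  simp [List.getElem?_range (by omega : k < n + 1)]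

theorem pv_le_foldl_max (l : List String) (b : Nat) :
    b ≤ l.foldl (fun c r => max c r.toList.length) b := by
  induction l generalizing b with
  | nil => simp
  | cons x xs ih => exact le_trans (le_max_left _ _) (ih _)

theorem pv_len_le_fold (data : List String) (row : String) (hrow : row ∈ data) :
    ∀ b : Nat, row.toList.length ≤ data.foldl (fun c r => max c r.toList.length) b := by
  induction data with
  | nil => cases hrow
  | cons x xs ih =>
    intro b
    rw [List.foldl_cons]
    rcases List.mem_cons.mp hrow with h | h
    · subst h
      exact le_trans (le_max_right _ _) (pv_le_foldl_max xs _)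
    · exact ih h _

-- ===== VERDICT (by name: the statement is the Claim_ definition above) =====
theorem find_galaxys_spec : Claim_equal_find_galaxys := by
  intro data er ec f _
  unfold Spec_find_galaxys find_galaxys find_galaxys_alt
  apply pv_foldl_enumerate_congr
  intro a i row hi0 hiR hrow
  apply pv_foldl_enumerate_congr
  intro g j ch hj0 hjlen hch
  by_cases h : ch = '#' <;> simp only [h, if_true, if_false]
  have hr : (pvBuildOff er data.length).getD i.toNat 0 = pvSumMem er i := by
    rw [pvBuildOff_getD er data.length i.toNat (by omega)]
    congr 1; omega
  have hlen : row.toList.length ≤ data.foldl (fun c r => max c r.toList.length) 0 :=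
    pv_len_le_fold data row hrow 0
  have hc : (pvBuildOff ec (data.foldl (fun c r => max c r.toList.length) 0)).getD j.toNat 0
      = pvSumMem ec j := by
    rw [pvBuildOff_getD ec _ j.toNat (by simp only at hjlen; omega)]
    congr 1; omega
  rw [hr, hc]
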